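-- pv_equiv track=rewrite | github.com/reikamoon/CS-1.2-Intro-Data-Structures | Code/histograms.py | count
-- ===== SOURCE A (Python) =====
-- def count(histogram):
--     #List of Counts
--     max_len = max(histogram.values())
--     new_histogram = []
--
--     for i in range(1, max_len + 1):
--         words = []
--         for key in histogram.keys():
--             if histogram.get(key) == i:
--                 words.append(key)
--         if words != []:
--             new_histogram.append((i, words))
--
--     return new_histogram
-- ===== SOURCE B (Python) =====
-- def count(histogram):
--     # single pass: bucket keys by their count, then emit counts in ascending order
--     buckets = {}
--     for key, c in histogram.items():
--         if c >= 1: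
--             buckets.setdefault(c, []).append(key)
--     return sorted(buckets.items(), key=lambda item: item[0])
-- ===== Notes on version B (the rewrite author's own statement) =====
-- stated objective: alternative
-- what changed: A rescans the whole dict once per candidate count i = 1..max(values); B makes a single pass bucketing keys into a dict-of-lists keyed by count and then emits the buckets with counts sorted ascending.
import Mathlib
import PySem

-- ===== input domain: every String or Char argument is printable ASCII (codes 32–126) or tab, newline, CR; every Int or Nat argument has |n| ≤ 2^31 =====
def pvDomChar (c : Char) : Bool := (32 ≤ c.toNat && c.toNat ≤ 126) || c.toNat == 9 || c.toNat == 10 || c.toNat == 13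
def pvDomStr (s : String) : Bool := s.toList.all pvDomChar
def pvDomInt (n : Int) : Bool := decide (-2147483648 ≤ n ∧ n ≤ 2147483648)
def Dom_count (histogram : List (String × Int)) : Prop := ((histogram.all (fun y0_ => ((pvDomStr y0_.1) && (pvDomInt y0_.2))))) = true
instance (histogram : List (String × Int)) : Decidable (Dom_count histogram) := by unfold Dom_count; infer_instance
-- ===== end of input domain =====

-- B replaces A's rescans of the dict for every count 1..max(values) by one bucketing pass
-- plus a sort of the distinct counts (an alternative algorithm; return value identical).

-- ===== PORT A =====
def count (histogram : List (String × Int)) : List (Int × List String) :=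
  match PySem.List.max? (histogram.map (fun kv => kv.2)) (fun v => v) with
  | none => []   -- Python raises ValueError here (empty dict); excluded by Pre_count
  | some maxLen =>
    (PySem.List.pyRange 1 (maxLen + 1) 1).foldl (fun acc i =>
      let words := histogram.foldl
        (fun ws kv => if kv.2 == i then ws ++ [kv.1] else ws) ([] : List String)
      if words ≠ [] then acc ++ [(i, words)] else acc) []

-- ===== PORT B =====
def count_alt (histogram : List (String × Int)) : List (Int × List String) :=
  let buckets : PySem.Dict Int (List String) := histogram.foldl
    (fun d kv => if 1 ≤ kv.2 then d.modify kv.2 [] (fun ws => ws ++ [kv.1]) else d)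
    PySem.Dict.empty
  PySem.List.sorted buckets.items (fun item => item.1) false

-- ===== PRECONDITION & SPEC =====
-- Pre_count excludes the empty dict, on which A raises ValueError (max of an empty sequence),
-- and association lists with duplicate keys, which represent no Python dict (the Lean encoding
-- of a dict admits them; no dict input of A corresponds to them).
def Pre_count (histogram : List (String × Int)) : Prop :=
  histogram ≠ [] ∧ (histogram.map Prod.fst).Nodup
instance (histogram : List (String × Int)) : Decidable (Pre_count histogram) := by
  unfold Pre_count; infer_instance
def pvWitness_count : (List (String × Int)) := [("a", 2), ("b", 1), ("c", 2)]

def Spec_count (histogram : List (String × Int)) (out : List (Int × List String)) : Prop :=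
  out = count_alt histogram
instance (histogram : List (String × Int)) (out : List (Int × List String)) :
    Decidable (Spec_count histogram out) := by unfold Spec_count; infer_instance

-- ===== CLAIM (what is proved, stated in full; the proofs are below) =====
def Claim_equal_count : Prop := ∀ (histogram : List (String × Int)), Dom_count histogram →
  Pre_count histogram → Spec_count histogram (count histogram)
-- ===== LEMMAS AND PROOFS =====

theorem count_eq_count_alt (histogram : List (String × Int)) (hne : histogram ≠ []) :
    count histogram = count_alt histogram := by
  -- the words list for a given count i
  simp only [count_alt]
  set W : Int → List String :=
    fun i => (histogram.filter (fun kv => kv.2 == i)).map (fun kv => kv.1) with hW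
  -- ===== shape of A =====
  obtain ⟨maxLen, hmax⟩ : ∃ m, PySem.List.max? (histogram.map (fun kv => kv.2)) (fun v => v) = some m := by
    rcases h : PySem.List.max? (histogram.map (fun kv => kv.2)) (fun v => v) with _ | m
    · rw [PySem.List.max?_eq_none_iff] at h
      simp at h; exact absurd h hne
    · exact ⟨m, h⟩
  have hApart : count histogram =
      ((PySem.List.pyRange 1 (maxLen + 1) 1).filter (fun i => decide (W i ≠ []))).map
        (fun i => (i, W i)) := by
    unfold count
    rw [hmax]
    simp only [PySem.List.foldl_append_if, List.nil_append]
    rw [PySem.List.foldl_append_ite (p := fun i => W i ≠ []) (f := fun i => (i, W i))]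
    simp
  -- ===== shape of B =====
  have hBfold : histogram.foldl
      (fun d kv => if 1 ≤ kv.2 then d.modify kv.2 [] (fun ws => ws ++ [kv.1]) else d)
      PySem.Dict.empty
      = ((histogram.filter (fun kv => decide (1 ≤ kv.2))).map (fun kv => (kv.2, kv.1))).foldl
          (fun d p => d.modify p.1 [] (fun ws => ws ++ [p.2])) PySem.Dict.empty := by
    rw [PySem.List.foldl_ite_eq_foldl_filter, List.foldl_map]
  set lf := histogram.filter (fun kv => decide (1 ≤ kv.2)) with hlf
  set l := lf.map (fun kv => (kv.2, kv.1)) with hl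
  set buckets := l.foldl (fun d p => d.modify p.1 [] (fun ws => ws ++ [p.2]))
      (PySem.Dict.empty : PySem.Dict Int (List String)) with hbk
  set K := PySem.Set.ofList (l.map (fun p => p.1)) with hK
  have hkeys : buckets.keys = K := by
    rw [hbk, PySem.Dict.keys_foldl_modify_key l (fun p => p.1) [] (fun _ p => (fun ws => ws ++ [p.2]))]
    simp [PySem.Dict.keys_empty, PySem.Set.update_nil_left, hK]
  have hnd : buckets.keys.Nodup := by
    rw [hkeys, hK]; exact PySem.Set.nodup_ofList _
  have hgetD : ∀ c, buckets.getD c [] = (lf.filter (fun kv => kv.2 == c)).map (fun kv => kv.1) := by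
    intro c
    rw [hbk, PySem.Dict.getD_foldl_modify_append, PySem.Dict.getD_empty, List.nil_append, hl,
      List.filter_map, List.map_map]
    simp [Function.comp_def]
  -- members of K are ≥ 1 and ≤ maxLen, i.e. present positive counts
  have hmemK : ∀ c, c ∈ K ↔ ∃ kv ∈ histogram, 1 ≤ kv.2 ∧ kv.2 = c := by
    intro c
    rw [hK, PySem.Set.mem_ofList, hl, List.map_map]
    simp only [List.mem_map, Function.comp_def, hlf, List.mem_filter, decide_eq_true_eq]
    constructor
    · rintro ⟨kv, ⟨hkv, h1⟩, rfl⟩; exact ⟨kv, hkv, h1, rfl⟩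
    · rintro ⟨kv, hkv, h1, rfl⟩; exact ⟨kv, ⟨hkv, h1⟩, rfl⟩
  have hle : ∀ kv ∈ histogram, kv.2 ≤ maxLen := by
    intro kv hkv
    have := PySem.List.max?_isMax hmax kv.2 (List.mem_map_of_mem hkv)
    simpa using this
  -- for c ≥ 1 the filter over lf is the filter over histogram
  have hWc : ∀ c, 1 ≤ c → buckets.getD c [] = W c := by
    intro c hc
    rw [hgetD, hlf, hW, List.filter_filter]
    congr 1
    apply List.filter_congr
    intro kv _
    by_cases h : kv.2 = c
    · simp [h, hc]
    · simp [h]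
  have hitems : buckets.items = K.map (fun c => (c, W c)) := by
    rw [PySem.Dict.items_eq_map_keys buckets hnd [], hkeys]
    apply List.map_congr_left
    intro c hc
    obtain ⟨kv, _, h1, rfl⟩ := (hmemK c).1 hc
    rw [hWc _ h1]
  -- index set of A
  set I := (PySem.List.pyRange 1 (maxLen + 1) 1).filter (fun i => decide (W i ≠ [])) with hI
  have hWne : ∀ i, W i ≠ [] ↔ ∃ kv ∈ histogram, kv.2 = i := by
    intro i
    rw [hW]
    simp [List.filter_eq_nil_iff]
  have hmemI : ∀ i, i ∈ I ↔ i ∈ K := by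
    intro i
    rw [hI, List.mem_filter, PySem.List.mem_pyRange_one, hmemK]
    simp only [decide_eq_true_eq]
    rw [hWne]
    constructor
    · rintro ⟨⟨h1, _⟩, kv, hkv, rfl⟩; exact ⟨kv, hkv, h1, rfl⟩
    · rintro ⟨kv, hkv, h1, rfl⟩
      exact ⟨⟨h1, by have := hle kv hkv; omega⟩, kv, hkv, rfl⟩
  have hndI : I.Nodup := (PySem.List.nodup_pyRange_one 1 (maxLen + 1)).filter _
  have hperm : (I.map (fun i => (i, W i))).Perm (K.map (fun c => (c, W c))) :=
    ((List.perm_ext_iff_of_nodup hndI (PySem.Set.nodup_ofList _)).2 hmemI).map _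
  have hpw : (I.map (fun i => (i, W i))).Pairwise
      (fun a b => (fun item : Int × List String => item.1) a < (fun item => item.1) b) := by
    rw [List.pairwise_map]
    exact (PySem.List.pairwise_lt_pyRange_one 1 (maxLen + 1)).filter _
  rw [hBfold, hitems, hApart]
  exact (PySem.List.sorted_eq_of_perm_of_pairwise_lt _ _ _ hperm hpw).symm

-- ===== VERDICT =====
theorem count_spec : Claim_equal_count := by
  intro histogram _ hpre
  unfold Spec_count
  exact count_eq_count_alt histogram hpre.1
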